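-- pv_equiv track=rewrite | github.com/preja/dynamic-programing | dynamic_programing_example.py | zad1mem
-- ===== SOURCE A (Python) =====
-- def zad1mem(n, memo):
--     if (memo[n] is not None):
--         result = memo[n]
--         return result
--     if (n == 1) or (n == 2):
--         return n
--     else:
--        result = zad1mem(n - 1,memo) + zad1mem(n - 2,memo)
--
--     memo[n] = result
--     return result
-- ===== SOURCE B (Python) =====
-- def zad1mem(n, memo):
--     if memo[n] is not None:
--         return memo[n]
--     if n == 1 or n == 2:
--         return n
--     for k in range(3, n + 1):
--         if memo[k] is None:
--             p1 = memo[k - 1] if memo[k - 1] is not None else k - 1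
--             p2 = memo[k - 2] if memo[k - 2] is not None else k - 2
--             memo[k] = p1 + p2
--     return memo[n]
-- ===== Notes on version B (the rewrite author's own statement) =====
-- stated objective: alternative
-- what changed: Top-down memoized recursion is replaced by an iterative bottom-up tabulation loop that fills memo[3..n] in order; return values agree, memo side-effects may differ (stated in the header).
-- outside the precondition, e.g. on zad1mem(0, [None, None, None, 3, 4]): A returns 7, B returns None
import Mathlib
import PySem

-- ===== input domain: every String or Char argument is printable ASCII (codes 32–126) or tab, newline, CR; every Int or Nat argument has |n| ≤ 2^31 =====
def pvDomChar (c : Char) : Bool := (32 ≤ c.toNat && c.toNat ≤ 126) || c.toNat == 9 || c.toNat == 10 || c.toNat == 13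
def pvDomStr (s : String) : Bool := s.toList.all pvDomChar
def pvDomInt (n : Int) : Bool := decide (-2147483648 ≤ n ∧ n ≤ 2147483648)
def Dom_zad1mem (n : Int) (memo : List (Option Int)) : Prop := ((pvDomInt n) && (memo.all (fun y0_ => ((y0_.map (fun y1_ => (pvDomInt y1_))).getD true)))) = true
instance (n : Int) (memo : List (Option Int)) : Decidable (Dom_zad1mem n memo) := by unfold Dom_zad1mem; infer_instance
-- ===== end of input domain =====

-- B replaces A's top-down memoized recursion by a bottom-up tabulation loop (alternative decomposition,
-- same cost); the equivalence proved here is about the RETURN value only: both mutate `memo`, but B may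
-- fill memo entries in [3,n) that A's recursion never visits.


-- ===== PORT A =====
-- literal transliteration of A's recursion; the recursion threads the mutated memo through as state.
-- fuel (n.toNat+1) only makes the recursion structural: inside Pre_ it never runs out (proved below).
-- The `none` (IndexError) fallback returns a junk value; Pre_ excludes those inputs.
def zad1memGo : Nat → Int → List (Option Int) → Int × List (Option Int)
  | 0, _, memo => (0, memo)
  | fuel+1, n, memo =>
    match PySem.List.pyGet? memo n with
    | some (some v) => (v, memo)
    | some none =>
      if n = 1 ∨ n = 2 then (n, memo)
      else
        let p := zad1memGo fuel (n - 1) memo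
        let q := zad1memGo fuel (n - 2) p.2
        (p.1 + q.1, PySem.List.pySetD q.2 n (some (p.1 + q.1)))
    | none => (0, memo)

def zad1mem (n : Int) (memo : List (Option Int)) : Int :=
  (zad1memGo (n.toNat + 1) n memo).1

-- ===== PORT B =====
-- one loop iteration of Source B: `if memo[k] is None: memo[k] = p1 + p2` (the `| _ => m` / `| _ => k-…`
-- fallbacks are where Python raises IndexError; Pre_ excludes those inputs).
def altStep (m : List (Option Int)) (k : Int) : List (Option Int) :=
  match PySem.List.pyGet? m k with
  | some none =>
    let p1 := match PySem.List.pyGet? m (k - 1) with | some (some v) => v | _ => k - 1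
    let p2 := match PySem.List.pyGet? m (k - 2) with | some (some v) => v | _ => k - 2
    PySem.List.pySetD m k (some (p1 + p2))
  | _ => m

def zad1mem_alt (n : Int) (memo : List (Option Int)) : Int :=
  match PySem.List.pyGet? memo n with
  | some (some v) => v
  | _ =>
    if n = 1 ∨ n = 2 then n
    else
      let m := (PySem.List.pyRange 3 (n + 1) 1).foldl altStep memo
      match PySem.List.pyGet? m n with
      | some (some v) => v
      | _ => 0   -- unreachable inside Pre_: the loop fills memo[n]

-- ===== PRECONDITION & SPEC =====
-- Pre_ excludes n outside [1, len(memo)) that has no cached entry at Python index n: there A either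
-- raises (IndexError / unbounded recursion into negative indices) or returns a value only by the
-- accident of negative-index wraparound during recursion, while B returns None (not an int).
def Pre_zad1mem (n : Int) (memo : List (Option Int)) : Prop :=
  (1 ≤ n ∧ n < (memo.length : Int)) ∨ ((PySem.List.pyGet? memo n).join.isSome = true)
instance (n : Int) (memo : List (Option Int)) : Decidable (Pre_zad1mem n memo) := by
  unfold Pre_zad1mem; infer_instance

def pvWitness_zad1mem : Int × List (Option Int) := (5, [none, none, none, none, none, none])

def Spec_zad1mem (n : Int) (memo : List (Option Int)) (out : Int) : Prop := out = zad1mem_alt n memo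
instance (n : Int) (memo : List (Option Int)) (out : Int) : Decidable (Spec_zad1mem n memo out) := by
  unfold Spec_zad1mem; infer_instance

-- ===== CLAIM (what is proved, stated in full; the proofs are below) =====
def Claim_equal_zad1mem : Prop := ∀ (n : Int) (memo : List (Option Int)),
  Dom_zad1mem n memo → Pre_zad1mem n memo → Spec_zad1mem n memo (zad1mem n memo)

-- ===== LEMMAS AND PROOFS =====

-- the mathematical value both programs compute: cached entry of the INITIAL memo if present,
-- else the base values 1,2 at indices 1,2, else the recurrence.
def specF (m0 : List (Option Int)) : Nat → Int
  | 0 => match m0[0]? with | some (some v) => v | _ => 0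
  | 1 => match m0[1]? with | some (some v) => v | _ => 1
  | 2 => match m0[2]? with | some (some v) => v | _ => 2
  | (k+3) => match m0[k+3]? with | some (some v) => v | _ => specF m0 (k+2) + specF m0 (k+1)

lemma specF_cached (m0 : List (Option Int)) (k : Nat) (v : Int) (h : m0[k]? = some (some v)) :
    specF m0 k = v := by
  match k with
  | 0 => simp [specF, h]
  | 1 => simp [specF, h]
  | 2 => simp [specF, h]
  | (k+3) => simp [specF, h]

lemma specF_base (m0 : List (Option Int)) (k : Nat) (h : m0[k]? = some none)
    (h12 : k = 1 ∨ k = 2) : specF m0 k = k := by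
  rcases h12 with rfl | rfl <;> simp [specF, h]

lemma specF_rec (m0 : List (Option Int)) (k : Nat) (h3 : 3 ≤ k) (h : m0[k]? = some none) :
    specF m0 k = specF m0 (k-1) + specF m0 (k-2) := by
  obtain ⟨j, rfl⟩ : ∃ j, k = j + 3 := ⟨k - 3, by omega⟩
  have e1 : j + 3 - 1 = j + 2 := by omega
  have e2 : j + 3 - 2 = j + 1 := by omega
  rw [e1, e2]; simp only [specF, h]

-- memo states reachable from m0: every entry is either the spec value or still the unfilled None of m0
def InvA (m0 m : List (Option Int)) : Prop :=
  m.length = m0.length ∧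
  ∀ k, k < m0.length → m[k]? = some (some (specF m0 k)) ∨ (m[k]? = some none ∧ m0[k]? = some none)

lemma InvA_init (m0 : List (Option Int)) : InvA m0 m0 := by
  refine ⟨rfl, fun k hk => ?_⟩
  have h : m0[k]? = some m0[k] := List.getElem?_eq_getElem hk
  match hv : m0[k] with
  | some v => exact Or.inl (by rw [h, hv, specF_cached m0 k v (by rw [h, hv])])
  | none => exact Or.inr ⟨by rw [h, hv], by rw [h, hv]⟩

lemma InvA_set (m0 m : List (Option Int)) (k : Nat) (hInv : InvA m0 m) (hk : k < m0.length) :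
    InvA m0 (m.set k (some (specF m0 k))) := by
  obtain ⟨hlen, hent⟩ := hInv
  refine ⟨by simp [hlen], fun j hj => ?_⟩
  by_cases hjk : j = k
  · subst hjk
    exact Or.inl (by rw [List.getElem?_set_self (by omega)])
  · rw [List.getElem?_set_ne (by omega)]
    exact hent j hj

lemma goA (m0 : List (Option Int)) (fuel : Nat) : ∀ (k : Nat) (m : List (Option Int)),
    InvA m0 m → 1 ≤ k → k < m0.length → k ≤ fuel →
    (zad1memGo fuel (k : Int) m).1 = specF m0 k ∧ InvA m0 (zad1memGo fuel (k : Int) m).2 := by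
  induction fuel with
  | zero => intro k m _ h1 _ hf; omega
  | succ f ih =>
    intro k m hInv h1 hlen hf
    have hget : PySem.List.pyGet? m (k : Int) = m[k]? := by
      simp [PySem.List.pyGet?_natCast]
    rcases hInv.2 k hlen with hcase | ⟨hcase, hm0⟩
    · simp [zad1memGo, hget, hcase, hInv]
    · by_cases h12 : k = 1 ∨ k = 2
      · rcases h12 with rfl | rfl
        · rw [show ((1:Nat):Int) = 1 by norm_num] at hget
          norm_num [zad1memGo, hget, hcase, specF_base m0 1 hm0 (Or.inl rfl), hInv]
        · rw [show ((2:Nat):Int) = 2 by norm_num] at hget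
          norm_num [zad1memGo, hget, hcase, specF_base m0 2 hm0 (Or.inr rfl), hInv]
      · have h3 : 3 ≤ k := by omega
        have hif : ¬ ((k : Int) = 1 ∨ (k : Int) = 2) := by omega
        have hc1 : (k : Int) - 1 = ((k - 1 : Nat) : Int) := by omega
        have hc2 : (k : Int) - 2 = ((k - 2 : Nat) : Int) := by omega
        obtain ⟨hv1, hi1⟩ := ih (k-1) m hInv (by omega) (by omega) (by omega)
        obtain ⟨hv2, hi2⟩ := ih (k-2) (zad1memGo f ((k-1 : Nat) : Int) m).2 hi1 (by omega) (by omega) (by omega)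
        have hklen2 : k < (zad1memGo f ((k-2 : Nat) : Int) (zad1memGo f ((k-1 : Nat) : Int) m).2).2.length := by
          rw [hi2.1]; exact hlen
        constructor
        · simp only [zad1memGo, hget, hcase, hif, if_false, hc1, hc2]
          rw [hv1, hv2, specF_rec m0 k h3 hm0]
        · simp only [zad1memGo, hget, hcase, hif, if_false, hc1, hc2]
          rw [hv1, hv2, PySem.List.pySetD_natCast, ← specF_rec m0 k h3 hm0]
          exact InvA_set m0 _ k hi2 hlen

-- B-side invariant: reachable state, with every index in [3, j] already filled
def InvB (m0 m : List (Option Int)) (j : Nat) : Prop :=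
  InvA m0 m ∧ ∀ i, 3 ≤ i → i ≤ j → m[i]? = some (some (specF m0 i))

lemma altStep_read (m0 m : List (Option Int)) (j : Nat) (hInv : InvA m0 m)
    (hjlen : j < m0.length) (hsmall : m[j]? = some none → j = 1 ∨ j = 2) :
    (match PySem.List.pyGet? m ((j : Nat) : Int) with
     | some (some v) => v | _ => ((j : Nat) : Int)) = specF m0 j := by
  have hget : PySem.List.pyGet? m (j : Int) = m[j]? := by simp [PySem.List.pyGet?_natCast]
  rcases hInv.2 j hjlen with hcase | ⟨hcase, hm0⟩
  · rw [hget, hcase]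
  · rw [hget, hcase]
    rw [specF_base m0 j hm0 (hsmall hcase)]

lemma altStep_inv (m0 m : List (Option Int)) (k : Nat) (h3 : 3 ≤ k) (hklen : k < m0.length)
    (hB : InvB m0 m (k-1)) : InvB m0 (altStep m (k : Int)) k := by
  obtain ⟨hInv, hfill⟩ := hB
  have hget : PySem.List.pyGet? m (k : Int) = m[k]? := by simp [PySem.List.pyGet?_natCast]
  have hc1 : (k : Int) - 1 = ((k - 1 : Nat) : Int) := by omega
  have hc2 : (k : Int) - 2 = ((k - 2 : Nat) : Int) := by omega
  rcases hInv.2 k hklen with hcase | ⟨hcase, hm0⟩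
  · -- memo[k] already filled: step is a no-op
    have hnoop : altStep m (k : Int) = m := by simp only [altStep, hget, hcase]
    rw [hnoop]
    refine ⟨hInv, fun i hi3 hik => ?_⟩
    by_cases hik' : i = k
    · subst hik'; exact hcase
    · exact hfill i hi3 (by omega)
  · -- memo[k] is None: write specF k
    have hp1 : (match PySem.List.pyGet? m ((k : Int) - 1) with
        | some (some v) => v | _ => (k : Int) - 1) = specF m0 (k-1) := by
      rw [hc1]
      exact altStep_read m0 m (k-1) hInv (by omega)
        (fun hnone => by
          by_contra h12
          have hfi := hfill (k-1) (by omega) (by omega)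
          rw [hfi] at hnone; simp at hnone)
    have hp2 : (match PySem.List.pyGet? m ((k : Int) - 2) with
        | some (some v) => v | _ => (k : Int) - 2) = specF m0 (k-2) := by
      rw [hc2]
      exact altStep_read m0 m (k-2) hInv (by omega)
        (fun hnone => by
          by_contra h12
          have hfi := hfill (k-2) (by omega) (by omega)
          rw [hfi] at hnone; simp at hnone)
    have hstep : altStep m (k : Int) = m.set k (some (specF m0 k)) := by
      simp only [altStep, hget, hcase]
      rw [hp1, hp2, PySem.List.pySetD_natCast, ← specF_rec m0 k h3 hm0]
    have hlenm : m.length = m0.length := hInv.1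
    rw [hstep]
    refine ⟨InvA_set m0 m k hInv hklen, fun i hi3 hik => ?_⟩
    by_cases hik' : i = k
    · subst hik'; rw [List.getElem?_set_self (by omega)]
    · rw [List.getElem?_set_ne (by omega)]
      exact hfill i hi3 (by omega)

lemma loopB (m0 : List (Option Int)) (j : Nat) (hj : 2 ≤ j) (hjlen : j < m0.length) :
    InvB m0 ((PySem.List.pyRange 3 ((j : Int) + 1) 1).foldl altStep m0) j := by
  induction j with
  | zero => omega
  | succ j ih =>
    by_cases hj2 : j < 2
    · -- j + 1 = 2: empty range
      have hj1 : j + 1 = 2 := by omega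
      rw [hj1]
      rw [PySem.List.pyRange_one_eq_nil (by norm_num)]
      exact ⟨InvA_init m0, fun i hi3 hik => by omega⟩
    · have hsplit : PySem.List.pyRange 3 (((j+1 : Nat) : Int) + 1) 1
          = PySem.List.pyRange 3 ((j : Int) + 1) 1 ++ [((j+1 : Nat) : Int)] := by
        have h1 : (((j+1 : Nat) : Int) + 1) = ((j : Int) + 1) + 1 := by push_cast; ring
        rw [h1, PySem.List.pyRange_one_succ_right (by omega)]
        norm_num
      rw [hsplit, List.foldl_append]
      simp only [List.foldl_cons, List.foldl_nil]
      have hprev := ih (by omega) (by omega)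
      have := altStep_inv m0 _ (j+1) (by omega) hjlen (by simpa using hprev)
      simpa using this

lemma main_core (n : Int) (memo : List (Option Int)) (h1 : 1 ≤ n)
    (h2 : n < (memo.length : Int)) (hj : PySem.List.pyGet? memo n = some none) :
    zad1mem n memo = zad1mem_alt n memo := by
  obtain ⟨N, rfl⟩ : ∃ N : Nat, n = (N : Int) := ⟨n.toNat, by omega⟩
  have hN1 : 1 ≤ N := by exact_mod_cast h1
  have hNlen : N < memo.length := by exact_mod_cast h2
  have hmemoN : memo[N]? = some none := by
    rwa [PySem.List.pyGet?_natCast] at hj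
  have hA : zad1mem (N : Int) memo = specF memo N := by
    unfold zad1mem
    rw [Int.toNat_natCast]
    exact (goA memo (N + 1) N memo (InvA_init memo) hN1 hNlen (by omega)).1
  by_cases h12 : N = 1 ∨ N = 2
  · have hifI : ((N : Int) = 1 ∨ (N : Int) = 2) := by
      rcases h12 with rfl | rfl <;> norm_num
    rw [hA, specF_base memo N hmemoN h12]
    simp only [zad1mem_alt, hj, if_pos hifI]
  · have hifI : ¬ ((N : Int) = 1 ∨ (N : Int) = 2) := by
      rintro (h | h) <;> exact h12 (by omega)
    have hloop := loopB memo N (by omega) hNlen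
    have hfillN := hloop.2 N (by omega) (le_refl N)
    rw [hA]
    simp only [zad1mem_alt, hj, if_neg hifI]
    rw [PySem.List.pyGet?_natCast, hfillN]

-- ===== VERDICT (by name: the statement is the Claim_ definition above) =====
theorem zad1mem_spec : Claim_equal_zad1mem := by
  intro n memo _ hpre
  unfold Spec_zad1mem
  cases hj : PySem.List.pyGet? memo n with
  | none =>
    exfalso
    rcases hpre with ⟨hh1, hh2⟩ | h
    · have hni := (PySem.List.pyGet?_eq_none_iff memo n).mp hj
      exact hni (by simp only [PySem.Raise.InRange]; omega)
    · rw [hj] at h; simp at h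
  | some o =>
    cases o with
    | some v =>
      have hA : zad1mem n memo = v := by simp [zad1mem, zad1memGo, hj]
      have hB : zad1mem_alt n memo = v := by simp [zad1mem_alt, hj]
      rw [hA, hB]
    | none =>
      have hrange : 1 ≤ n ∧ n < (memo.length : Int) := by
        rcases hpre with h | h
        · exact h
        · rw [hj] at h; simp at h
      exact main_core n memo hrange.1 hrange.2 hj
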